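-- pv_equiv track=rewrite | github.com/blackjack6666/deep_proteome | multiprocessing_naive_algorithym.py | create_unique_id_peptide_dict
-- ===== SOURCE A (Python) =====
-- from collections import defaultdict
--
-- def create_unique_id_peptide_dict(pep_id_dict):
--     """
--     get a dictionary with unique peptides for each protein
--     :param pep_id_dict:
--     :return:
--     """
--     unique_id_peptide_dict = defaultdict(set)
--     unique_id_peptide_count_dict = defaultdict(int)
--     unique_pep_id_dict = {pep:prot for pep in pep_id_dict for prot in pep_id_dict[pep]
--                           if len(pep_id_dict[pep])==1}
--     for pep in unique_pep_id_dict: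
--         unique_id_peptide_dict[unique_pep_id_dict[pep]].add(pep)
--
--     for id in unique_id_peptide_dict:
--         unique_id_peptide_count_dict[id]=len(unique_id_peptide_dict[id])
--
--     return unique_id_peptide_dict, unique_id_peptide_count_dict
-- ===== SOURCE B (Python) =====
-- from collections import defaultdict
--
-- def create_unique_id_peptide_dict(pep_id_dict):
--     """Flatten to (protein, peptide) pairs, dedup the protein order, then gather each
--     protein's peptides by a per-protein scan (no grouping dict)."""
--     pairs = [(prots[0], pep) for pep, prots in pep_id_dict.items() if len(prots) == 1]
--     prot_order = list(dict.fromkeys(prot for prot, _ in pairs))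
--     unique_id_peptide_dict = defaultdict(set)
--     unique_id_peptide_count_dict = defaultdict(int)
--     for prot in prot_order:
--         peps = {pep for p, pep in pairs if p == prot}
--         unique_id_peptide_dict[prot] = peps
--         unique_id_peptide_count_dict[prot] = len(peps)
--     return unique_id_peptide_dict, unique_id_peptide_count_dict
-- ===== Notes on version B (the rewrite author's own statement) =====
-- stated objective: alternative
-- what changed: B replaces A's dict-grouping pipeline (pep->prot index dict, then incremental set-insertion grouping) by flattening to (protein, peptide) pairs, deduplicating the protein order with dict.fromkeys, and gathering each protein's peptides by a per-protein scan over the pairs; the grouping dict disappears.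
import Mathlib
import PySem

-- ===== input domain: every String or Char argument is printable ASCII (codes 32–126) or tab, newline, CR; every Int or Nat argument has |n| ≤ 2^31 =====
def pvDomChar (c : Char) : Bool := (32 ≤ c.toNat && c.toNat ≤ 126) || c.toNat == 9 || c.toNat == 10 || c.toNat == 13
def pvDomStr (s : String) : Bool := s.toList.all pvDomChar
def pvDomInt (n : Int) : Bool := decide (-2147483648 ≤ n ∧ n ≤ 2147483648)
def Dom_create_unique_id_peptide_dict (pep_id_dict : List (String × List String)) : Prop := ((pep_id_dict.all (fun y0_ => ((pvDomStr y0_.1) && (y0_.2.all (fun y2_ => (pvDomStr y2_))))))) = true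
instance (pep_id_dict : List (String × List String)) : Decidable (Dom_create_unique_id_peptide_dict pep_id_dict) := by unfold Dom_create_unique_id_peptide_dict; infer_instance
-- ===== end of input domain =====

-- B flattens to (protein, peptide) pairs, dedups the protein order, and gathers each
-- protein's peptides by a per-protein scan — no grouping dict (objective: alternative).

-- ===== PORT A =====
def create_unique_id_peptide_dict (pep_id_dict : List (String × List String)) : (List (String × List String)) × (List (String × Int)) :=
  let src : PySem.Dict String (List String) := PySem.Dict.mk pep_id_dict
  -- unique_pep_id_dict = {pep: prot for pep in pep_id_dict for prot in pep_id_dict[pep] if len(pep_id_dict[pep]) == 1}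
  let unique_pep_id_dict : PySem.Dict String String :=
    pep_id_dict.foldl (fun acc kv =>
      (src.getD kv.1 []).foldl (fun acc2 prot =>
        if (src.getD kv.1 []).length == 1 then acc2.insert kv.1 prot else acc2) acc)
      PySem.Dict.empty
  -- for pep in unique_pep_id_dict: unique_id_peptide_dict[unique_pep_id_dict[pep]].add(pep)
  let unique_id_peptide_dict : PySem.Dict String (PySem.Set String) :=
    unique_pep_id_dict.items.foldl (fun g kv =>
      g.modify (unique_pep_id_dict.getD kv.1 "") PySem.Set.empty (fun s => PySem.Set.add s kv.1))
      PySem.Dict.empty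
  -- for id in unique_id_peptide_dict: unique_id_peptide_count_dict[id] = len(unique_id_peptide_dict[id])
  let unique_id_peptide_count_dict : PySem.Dict String Int :=
    unique_id_peptide_dict.items.foldl (fun c kv =>
      c.insert kv.1 (PySem.Set.len (unique_id_peptide_dict.getD kv.1 PySem.Set.empty)))
      PySem.Dict.empty
  (unique_id_peptide_dict.items, unique_id_peptide_count_dict.items)

-- ===== PORT B =====
def create_unique_id_peptide_dict_alt (pep_id_dict : List (String × List String)) : (List (String × List String)) × (List (String × Int)) :=
  -- pairs = [(prots[0], pep) for pep, prots in pep_id_dict.items() if len(prots) == 1]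
  let pairs : List (String × String) :=
    pep_id_dict.foldl (fun acc kv =>
      if kv.2.length == 1 then
        match kv.2 with
        | prot :: _ => acc ++ [(prot, kv.1)]
        | [] => acc   -- unreachable under the length guard
      else acc) []
  -- prot_order = list(dict.fromkeys(prot for prot, _ in pairs))
  let prot_order : List String := PySem.List.dedup (pairs.map (·.1))
  -- for prot in prot_order: peps = {pep for p, pep in pairs if p == prot}; d[prot] = peps; c[prot] = len(peps)
  let dicts : PySem.Dict String (PySem.Set String) × PySem.Dict String Int :=
    prot_order.foldl (fun st prot =>
      let peps : PySem.Set String := PySem.Set.ofList ((pairs.filter (fun q => q.1 == prot)).map (·.2))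
      (st.1.insert prot peps, st.2.insert prot (PySem.Set.len peps)))
      (PySem.Dict.empty, PySem.Dict.empty)
  (dicts.1.items, dicts.2.items)

-- ===== PRECONDITION & SPEC =====
-- Pre_ excludes association lists with duplicate keys: a Python dict cannot contain them,
-- so such lists do not encode any input of A.
def Pre_create_unique_id_peptide_dict (pep_id_dict : List (String × List String)) : Prop :=
  (pep_id_dict.map Prod.fst).Nodup
instance (pep_id_dict : List (String × List String)) : Decidable (Pre_create_unique_id_peptide_dict pep_id_dict) := by unfold Pre_create_unique_id_peptide_dict; infer_instance

def pvWitness_create_unique_id_peptide_dict : (List (String × List String)) :=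
  [("p1", ["x"]), ("p2", ["x", "y"]), ("p3", ["y"])]

def Spec_create_unique_id_peptide_dict (pep_id_dict : List (String × List String)) (out : (List (String × List String)) × (List (String × Int))) : Prop := out = create_unique_id_peptide_dict_alt pep_id_dict
instance (pep_id_dict : List (String × List String)) (out : (List (String × List String)) × (List (String × Int))) : Decidable (Spec_create_unique_id_peptide_dict pep_id_dict out) := by unfold Spec_create_unique_id_peptide_dict; infer_instance

-- ===== CLAIM (what is proved, stated in full; the proofs are below) =====
def Claim_equal_create_unique_id_peptide_dict : Prop := ∀ (pep_id_dict : List (String × List String)), Dom_create_unique_id_peptide_dict pep_id_dict → Pre_create_unique_id_peptide_dict pep_id_dict → Spec_create_unique_id_peptide_dict pep_id_dict (create_unique_id_peptide_dict pep_id_dict)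

-- ===== LEMMAS AND PROOFS =====

-- the peptide → single-protein pairs that A's comprehension keeps
def pvUniq (kv : String × List String) : Option (String × String) :=
  match kv with
  | (p, [x]) => some (p, x)
  | _ => none

theorem pvKeysSublist (l : List (String × List String)) :
    ((l.filterMap pvUniq).map Prod.fst).Sublist (l.map Prod.fst) := by
  induction l with
  | nil => simp
  | cons kv t ih =>
    obtain ⟨p, ps⟩ := kv
    match ps with
    | [x] => simp only [List.filterMap_cons, pvUniq, List.map_cons]; exact ih.cons₂ p
    | [] => simpa [pvUniq] using ih.cons p
    | x :: y :: r => simpa [pvUniq] using ih.cons p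

-- foldl only depends on the step function's behaviour on the list's members
theorem pvFoldlCongr {α β : Type} (l : List β) (f g : α → β → α) (init : α)
    (h : ∀ acc x, x ∈ l → f acc x = g acc x) : l.foldl f init = l.foldl g init := by
  induction l generalizing init with
  | nil => rfl
  | cons x t ih =>
    simp only [List.foldl_cons]
    rw [h init x (by simp)]
    exact ih _ (fun acc y hy => h acc y (by simp [hy]))

-- the grouping fold's lookup at c accumulates exactly the peptides whose protein is c
theorem pvGetDGroup (L : List (String × String)) (d : PySem.Dict String (PySem.Set String)) (c : String) :
    (L.foldl (fun g kv => g.modify kv.2 PySem.Set.empty (fun s => PySem.Set.add s kv.1)) d).getD c PySem.Set.empty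
      = PySem.Set.update (d.getD c PySem.Set.empty) ((L.filter (fun kv => kv.2 == c)).map (·.1)) := by
  induction L generalizing d with
  | nil => simp [PySem.Set.update_nil]
  | cons kv t ih =>
    simp only [List.foldl_cons, ih, List.filter_cons]
    by_cases h : kv.2 = c
    · subst h
      rw [PySem.Dict.getD_modify_self]
      simp [PySem.Set.update_cons]
    · rw [PySem.Dict.getD_modify_of_ne d _ _ (fun hc => h hc.symm)]
      simp [h]

-- B's loop carries a pair of dicts; the fold splits into the two insert-folds
theorem pvFoldlProd (pairs : List (String × String)) (order : List String)
    (a : PySem.Dict String (PySem.Set String)) (b : PySem.Dict String Int) :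
    order.foldl (fun st prot =>
        let peps : PySem.Set String := PySem.Set.ofList ((pairs.filter (fun q => q.1 == prot)).map (·.2))
        (st.1.insert prot peps, st.2.insert prot (PySem.Set.len peps))) (a, b)
      = (order.foldl (fun d prot => d.insert prot (PySem.Set.ofList ((pairs.filter (fun q => q.1 == prot)).map (·.2)))) a,
         order.foldl (fun d prot => d.insert prot (PySem.Set.len (PySem.Set.ofList ((pairs.filter (fun q => q.1 == prot)).map (·.2))))) b) := by
  induction order generalizing a b with
  | nil => rfl
  | cons x t ih => simp only [List.foldl_cons]; exact ih _ _

-- B's comprehension loop builds the swapped pairs of A's kept entries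
theorem pvPairsEq (l : List (String × List String)) (acc : List (String × String)) :
    l.foldl (fun acc kv =>
      if kv.2.length == 1 then
        match kv.2 with
        | prot :: _ => acc ++ [(prot, kv.1)]
        | [] => acc
      else acc) acc
    = acc ++ (l.filterMap pvUniq).map (fun p => (p.2, p.1)) := by
  induction l generalizing acc with
  | nil => simp
  | cons kv t ih =>
    obtain ⟨p, ps⟩ := kv
    match ps with
    | [x] => simp only [List.foldl_cons]; rw [ih]; simp [pvUniq]
    | [] => simp only [List.foldl_cons]; rw [ih]; simp [pvUniq]
    | x :: y :: r => simp only [List.foldl_cons]; rw [ih]; simp [pvUniq]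

theorem create_unique_id_peptide_dict_spec : Claim_equal_create_unique_id_peptide_dict := by
  intro l _ hpre
  unfold Pre_create_unique_id_peptide_dict at hpre
  unfold Spec_create_unique_id_peptide_dict
  unfold create_unique_id_peptide_dict create_unique_id_peptide_dict_alt
  set L := l.filterMap pvUniq with hL
  have hsrc_items : (PySem.Dict.mk l).items = l := rfl
  have hsrc_keys : (PySem.Dict.mk l).keys.Nodup := hpre
  -- phase A1: A's comprehension dict has items L
  have hlook : ∀ (acc : PySem.Dict String String) (kv : String × List String), kv ∈ l →
      (fun acc kv =>
        ((PySem.Dict.mk l).getD kv.1 []).foldl (fun acc2 prot =>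
          if ((PySem.Dict.mk l).getD kv.1 []).length == 1 then acc2.insert kv.1 prot else acc2) acc)
        acc kv
      = (fun acc kv => match pvUniq kv with
          | some p => acc.insert p.1 p.2
          | none => acc) acc kv := by
    intro acc kv hmem
    have hget : (PySem.Dict.mk l).getD kv.1 [] = kv.2 :=
      PySem.Dict.getD_of_mem_items (PySem.Dict.mk l) (by simpa [hsrc_items]) hsrc_keys []
    simp only [hget]
    obtain ⟨p, ps⟩ := kv
    match ps with
    | [x] => simp [pvUniq]
    | [] => simp [pvUniq]
    | x :: y :: r => simp [pvUniq]
  have hU : (l.foldl (fun acc kv =>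
      ((PySem.Dict.mk l).getD kv.1 []).foldl (fun acc2 prot =>
        if ((PySem.Dict.mk l).getD kv.1 []).length == 1 then acc2.insert kv.1 prot else acc2) acc)
      PySem.Dict.empty)
      = L.foldl (fun acc p => acc.insert p.1 p.2) PySem.Dict.empty := by
    rw [pvFoldlCongr l _ _ _ (fun acc x h => hlook acc x h), hL, List.foldl_filterMap]
    exact pvFoldlCongr _ _ _ _ (by intro acc kv _; cases h : pvUniq kv <;> simp)
  have hLkeys : (L.map Prod.fst).Nodup := (pvKeysSublist l).nodup hpre
  have hUitems : (L.foldl (fun acc p => acc.insert p.1 p.2) PySem.Dict.empty).items = L := by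
    rw [PySem.Dict.items_foldl_insert_fresh L Prod.fst Prod.snd PySem.Dict.empty
      (by intro a _; simp [PySem.Dict.contains_empty]) hLkeys]
    simp [PySem.Dict.empty]
  have hUkeys : (L.foldl (fun acc p => acc.insert p.1 p.2) PySem.Dict.empty).keys.Nodup := by
    have : (L.foldl (fun acc p => acc.insert p.1 p.2) PySem.Dict.empty).keys
        = L.map Prod.fst := by
      simp only [PySem.Dict.keys, hUitems]
    rw [this]; exact hLkeys
  -- phase A2: A's grouping dict is the modify-fold over L
  have hphase2A : ((L.foldl (fun acc p => acc.insert p.1 p.2) PySem.Dict.empty).items.foldl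
      (fun g kv =>
        g.modify ((L.foldl (fun acc p => acc.insert p.1 p.2) PySem.Dict.empty).getD kv.1 "")
          PySem.Set.empty (fun s => PySem.Set.add s kv.1)) PySem.Dict.empty)
      = L.foldl (fun g kv => g.modify kv.2 PySem.Set.empty (fun s => PySem.Set.add s kv.1))
          PySem.Dict.empty := by
    rw [hUitems]
    apply pvFoldlCongr
    intro g kv hmem
    have : (L.foldl (fun acc p => acc.insert p.1 p.2) PySem.Dict.empty).getD kv.1 "" = kv.2 :=
      PySem.Dict.getD_of_mem_items _ (by simpa [hUitems]) hUkeys ""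
    simp [this]
  set G := L.foldl (fun g kv => g.modify kv.2 PySem.Set.empty (fun s => PySem.Set.add s kv.1))
      PySem.Dict.empty with hG
  have hGkeys : G.keys.Nodup := by
    rw [hG]
    exact PySem.Dict.nodup_keys_foldl_modify_key L Prod.snd PySem.Set.empty
      (fun _ kv s => PySem.Set.add s kv.1) PySem.Dict.empty (by simp [PySem.Dict.keys_empty])
  -- characterize A's grouping dict: keys are the deduped proteins, values the filtered peptides
  have hGkeysEq : G.keys = PySem.Set.ofList (L.map (·.2)) := by
    rw [hG, PySem.Dict.keys_foldl_modify_key L (·.2) PySem.Set.empty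
      (fun _ kv s => PySem.Set.add s kv.1) PySem.Dict.empty]
    rw [PySem.Dict.keys_empty, PySem.Set.update_nil_left]
  have hGgetD : ∀ c, G.getD c PySem.Set.empty
      = PySem.Set.ofList ((L.filter (fun kv => kv.2 == c)).map (·.1)) := by
    intro c
    rw [hG, pvGetDGroup]
    simp only [PySem.Dict.getD_empty, PySem.Set.empty, PySem.Set.update_nil_left]
  have hGitems : G.items = (PySem.Set.ofList (L.map (·.2))).map
      (fun c => (c, PySem.Set.ofList ((L.filter (fun kv => kv.2 == c)).map (·.1)))) := by
    rw [PySem.Dict.items_eq_map_keys G hGkeys PySem.Set.empty, hGkeysEq]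
    exact List.map_congr_left (fun c _ => by rw [hGgetD c])
  -- phase A3: A's count dict items
  have hcountA : (G.items.foldl (fun c kv =>
        c.insert kv.1 (PySem.Set.len (G.getD kv.1 PySem.Set.empty))) PySem.Dict.empty).items
      = G.items.map (fun kv => (kv.1, PySem.Set.len kv.2)) := by
    rw [pvFoldlCongr G.items _
      (fun c kv => c.insert kv.1 (PySem.Set.len kv.2)) _
      (by intro c kv hmem
          have : G.getD kv.1 ([] : PySem.Set String) = kv.2 :=
            PySem.Dict.getD_of_mem_items _ (by simpa using hmem) hGkeys _
          simp [this])]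
    rw [PySem.Dict.items_foldl_insert_fresh G.items (·.1) (fun kv => PySem.Set.len kv.2)
      PySem.Dict.empty (by intro a _; simp [PySem.Dict.contains_empty]) hGkeys]
    simp [PySem.Dict.empty]
  -- phase B: B's pairs are L swapped, and its two insert-folds append in dedup order
  rw [pvPairsEq]
  simp only [List.nil_append]
  set P := L.map (fun p => (p.2, p.1)) with hP
  have hPfst : P.map (·.1) = L.map (·.2) := by simp [hP]
  have hPfilter : ∀ c, (P.filter (fun q => q.1 == c)).map (·.2)
      = (L.filter (fun kv => kv.2 == c)).map (·.1) := by
    intro c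
    simp [hP, List.filter_map, Function.comp_def]
  set order := PySem.List.dedup (P.map (·.1)) with horder
  have horderEq : order = PySem.Set.ofList (L.map (·.2)) := by
    rw [horder, hPfst, PySem.List.dedup_eq_ofList]
  have hordNodup : order.Nodup := by rw [horderEq]; exact PySem.Set.nodup_ofList _
  rw [pvFoldlProd P order PySem.Dict.empty PySem.Dict.empty]
  have hBitems1 : (order.foldl (fun d prot =>
      d.insert prot (PySem.Set.ofList ((P.filter (fun q => q.1 == prot)).map (·.2))))
      PySem.Dict.empty).items
      = order.map (fun c => (c, PySem.Set.ofList ((P.filter (fun q => q.1 == c)).map (·.2)))) := by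
    rw [PySem.Dict.items_foldl_insert_fresh order (fun c => c)
      (fun c => PySem.Set.ofList ((P.filter (fun q => q.1 == c)).map (·.2)))
      PySem.Dict.empty (by intro a _; simp [PySem.Dict.contains_empty]) (by simpa using hordNodup)]
    simp [PySem.Dict.empty]
  have hBitems2 : (order.foldl (fun d prot =>
      d.insert prot (PySem.Set.len (PySem.Set.ofList ((P.filter (fun q => q.1 == prot)).map (·.2)))))
      PySem.Dict.empty).items
      = order.map (fun c => (c, PySem.Set.len (PySem.Set.ofList ((P.filter (fun q => q.1 == c)).map (·.2))))) := by
    rw [PySem.Dict.items_foldl_insert_fresh order (fun c => c)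
      (fun c => PySem.Set.len (PySem.Set.ofList ((P.filter (fun q => q.1 == c)).map (·.2))))
      PySem.Dict.empty (by intro a _; simp [PySem.Dict.contains_empty]) (by simpa using hordNodup)]
    simp [PySem.Dict.empty]
  -- assemble
  simp only [hU, hphase2A]
  rw [hcountA, hGitems, hBitems1, hBitems2, horderEq]
  simp only [Prod.mk.injEq]
  constructor
  · exact List.map_congr_left (fun c _ => by rw [hPfilter c])
  · rw [List.map_map]
    exact List.map_congr_left (fun c _ => by simp [hPfilter c])
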